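-- pv_equiv track=rewrite | github.com/GijsSi/qube | config.py | ledConfig
-- ===== SOURCE A (Python) =====
-- def ledConfig(width, length, height):
--     pixels = [[[0 for z in range(height)] for y in range(length)] for x in range(width)]
--     pixel = 0
--
--     for x in range(len(pixels)):
--         if x % 2 == 0:
--             duck = range(len(pixels[x]))
--         else:
--             duck = range(len(pixels[x]) - 1, -1, -1)
--         for y in duck:
--             # if (x % 2 != 0 and y % 2 == 0) or (x % 2 == 0 and y % 2 != 0):
--             #     duck = range(len(pixels[x][y])-1,-1,-1)
--             # else:
--             #     duck = range(len(pixels[x][y]))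
--             for z in range(len(pixels[x][y])):
--                 pixels[x][y][z] = pixel
--                 pixel += 1
--     return pixels
-- ===== SOURCE B (Python) =====
-- def ledConfig(width, length, height):
--     return [[[x * length * height
--               + (y if x % 2 == 0 else length - 1 - y) * height
--               + z
--               for z in range(height)]
--              for y in range(length)]
--             for x in range(width)]
-- ===== Notes on version B (the rewrite author's own statement) =====
-- stated objective: simpler
-- what changed: Replaces the mutable prebuilt grid and running counter with a single triple nested comprehension computing each cell's value by the closed form x*length*height + (y or length-1-y)*height + z.
import Mathlib
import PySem

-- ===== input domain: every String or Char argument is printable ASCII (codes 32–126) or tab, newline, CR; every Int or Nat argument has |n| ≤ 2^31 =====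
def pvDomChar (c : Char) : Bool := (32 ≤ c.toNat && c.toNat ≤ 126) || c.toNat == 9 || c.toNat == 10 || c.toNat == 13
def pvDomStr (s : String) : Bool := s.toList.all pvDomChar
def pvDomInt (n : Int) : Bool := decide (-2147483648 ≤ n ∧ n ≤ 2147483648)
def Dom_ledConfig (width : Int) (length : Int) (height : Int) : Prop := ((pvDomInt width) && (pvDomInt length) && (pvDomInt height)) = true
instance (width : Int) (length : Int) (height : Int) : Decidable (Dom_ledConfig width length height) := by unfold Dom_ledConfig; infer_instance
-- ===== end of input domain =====

-- B replaces A's mutable prebuilt grid and running counter with one triple nested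
-- comprehension computing each cell by the closed form x*length*height + (y | length-1-y)*height + z (objective: simpler).

-- ===== PORT A =====
-- pixels[x][y][z] = v ; exact for the nonnegative in-range indices this port uses
def pvSet3 (px : List (List (List Int))) (x y z : Int) (v : Int) : List (List (List Int)) :=
  let row := PySem.List.pyGetD px x []
  let cell := PySem.List.pyGetD row y []
  px.set x.toNat (row.set y.toNat (cell.set z.toNat v))

-- body of the innermost z-loop: 'pixels[x][y][z] = pixel; pixel += 1'
def pvStepZ (x y : Int) (st : List (List (List Int)) × Int) (z : Int) : List (List (List Int)) × Int :=
  (pvSet3 st.1 x y z st.2, st.2 + 1)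

-- body of the y-loop: 'for z in range(len(pixels[x][y])): …'
def pvStepY (x : Int) (st : List (List (List Int)) × Int) (y : Int) : List (List (List Int)) × Int :=
  (PySem.List.pyRange 0 ((PySem.List.pyGetD (PySem.List.pyGetD st.1 x []) y []).length : Int) 1).foldl
    (pvStepZ x y) st

-- body of the x-loop: choose 'duck' by parity, then 'for y in duck: …'
def pvStepX (st : List (List (List Int)) × Int) (x : Int) : List (List (List Int)) × Int :=
  let duck :=
    if PySem.Int.mod x 2 == 0 then
      PySem.List.pyRange 0 ((PySem.List.pyGetD st.1 x []).length : Int) 1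
    else
      PySem.List.pyRange (((PySem.List.pyGetD st.1 x []).length : Int) - 1) (-1) (-1)
  duck.foldl (pvStepY x) st

def ledConfig (width : Int) (length : Int) (height : Int) : List (List (List Int)) :=
  let pixels : List (List (List Int)) :=
    (PySem.List.pyRange 0 width 1).map (fun _ =>
      (PySem.List.pyRange 0 length 1).map (fun _ =>
        (PySem.List.pyRange 0 height 1).map (fun _ => (0 : Int))))
  ((PySem.List.pyRange 0 (pixels.length : Int) 1).foldl pvStepX (pixels, 0)).1

-- ===== PORT B =====
def ledConfig_alt (width : Int) (length : Int) (height : Int) : List (List (List Int)) :=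
  (PySem.List.pyRange 0 width 1).map (fun x =>
    (PySem.List.pyRange 0 length 1).map (fun y =>
      (PySem.List.pyRange 0 height 1).map (fun z =>
        x * length * height + (if PySem.Int.mod x 2 == 0 then y else length - 1 - y) * height + z)))

-- ===== PRECONDITION & SPEC =====
def Spec_ledConfig (width : Int) (length : Int) (height : Int) (out : List (List (List Int))) : Prop := out = ledConfig_alt width length height
instance (width : Int) (length : Int) (height : Int) (out : List (List (List Int))) : Decidable (Spec_ledConfig width length height out) := by unfold Spec_ledConfig; infer_instance

-- ===== CLAIM (what is proved, stated in full; the proofs are below) =====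
def Claim_equal_ledConfig : Prop := ∀ (width : Int) (length : Int) (height : Int), Dom_ledConfig width length height → Spec_ledConfig width length height (ledConfig width length height)

-- ===== LEMMAS AND PROOFS =====

-- one finished cell: [p, p+1, …, p+H-1]
def pvCell (p : Int) (H : Nat) : List Int := (List.range H).map (fun (z : Nat) => p + (z : Int))

-- one finished row for row index xi, starting counter q
def pvRow (q : Int) (xi : Int) (L H : Nat) : List (List Int) :=
  (List.range L).map (fun (y : Nat) =>
    pvCell (q + (if PySem.Int.mod xi 2 == 0 then (y : Int) else (L : Int) - 1 - (y : Int)) * (H : Int)) H)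

def pvTarget (width : Int) (length : Int) (height : Int) : List (List (List Int)) :=
  (List.range width.toNat).map (fun (x : Nat) =>
    pvRow ((x : Int) * ((length.toNat * height.toNat : Nat) : Int)) (x : Int) length.toNat height.toNat)

lemma pv_cell_succ (p : Int) (n : Nat) : pvCell p (n + 1) = pvCell p n ++ [p + (n : Int)] := by
  simp [pvCell, List.range_succ]

lemma pv_set_getD {α : Type} (l : List α) (i : Nat) (d : α) (h : i < l.length) :
    l.set i (l.getD i d) = l := by
  rw [List.getD_eq_getElem _ _ h]; exact List.set_getElem_self h

lemma pv_getD_set_ne {α : Type} (l : List α) (i j : Nat) (v d : α) (hij : i ≠ j) :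
    (l.set i v).getD j d = l.getD j d := by
  by_cases hj : j < l.length
  · rw [List.getD_eq_getElem _ _ (by simpa using hj), List.getD_eq_getElem _ _ hj,
      List.getElem_set_ne hij]
  · rw [List.getD_eq_default _ _ (by simpa using Nat.le_of_not_lt hj),
      List.getD_eq_default _ _ (Nat.le_of_not_lt hj)]

lemma pv_inner (x y : Int) (hx : 0 ≤ x) (hy : 0 ≤ y) (px : List (List (List Int))) (p : Int)
    (hxl : x.toNat < px.length) (hyl : y.toNat < (px.getD x.toNat []).length)
    (n : Nat) (hn : n ≤ ((px.getD x.toNat []).getD y.toNat []).length) :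
    (PySem.List.pyRange 0 (n : Int) 1).foldl (pvStepZ x y) (px, p) =
      (px.set x.toNat ((px.getD x.toNat []).set y.toNat
        (pvCell p n ++ ((px.getD x.toNat []).getD y.toNat []).drop n)), p + n) := by
  induction n with
  | zero =>
      rw [PySem.List.pyRange_one_eq_nil (by simp)]
      simp only [List.foldl_nil, pvCell, List.range_zero, List.map_nil, List.nil_append,
        List.drop_zero, Nat.cast_zero, add_zero]
      rw [List.getD_eq_getElem _ _ hyl, List.set_getElem_self,
        List.getD_eq_getElem _ _ hxl, List.set_getElem_self]
  | succ n ih =>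
      have hcell : n < ((px.getD x.toNat []).getD y.toNat []).length := hn
      have hxI : x < (px.length : Int) := by omega
      have hyI : y < ((px.getD x.toNat []).length : Int) := by omega
      rw [show ((n + 1 : Nat) : Int) = (n : Int) + 1 by push_cast; ring,
        PySem.List.pyRange_one_succ_right (by exact_mod_cast Nat.zero_le n),
        List.foldl_append, ih (Nat.le_of_succ_le hn)]
      simp only [List.foldl_cons, List.foldl_nil, pvStepZ, pvSet3]
      have hgx : PySem.List.pyGetD (px.set x.toNat ((px.getD x.toNat []).set y.toNat
            (pvCell p n ++ ((px.getD x.toNat []).getD y.toNat []).drop n))) x []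
          = (px.getD x.toNat []).set y.toNat
            (pvCell p n ++ ((px.getD x.toNat []).getD y.toNat []).drop n) := by
        rw [PySem.List.pyGetD_eq_getElem _ _ hx (by simpa using hxI), List.getElem_set_self]
      rw [hgx]
      have hgy : PySem.List.pyGetD ((px.getD x.toNat []).set y.toNat
            (pvCell p n ++ ((px.getD x.toNat []).getD y.toNat []).drop n)) y []
          = pvCell p n ++ ((px.getD x.toNat []).getD y.toNat []).drop n := by
        rw [PySem.List.pyGetD_eq_getElem _ _ hy (by simpa using hyI), List.getElem_set_self]
      rw [hgy]
      have hset : (pvCell p n ++ ((px.getD x.toNat []).getD y.toNat []).drop n).set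
            ((n : Int)).toNat (p + (n : Int))
          = pvCell p (n + 1) ++ ((px.getD x.toNat []).getD y.toNat []).drop (n + 1) := by
        rw [Int.toNat_natCast, List.drop_eq_getElem_cons hcell, List.set_append]
        have hlen : (pvCell p n).length = n := by simp [pvCell]
        simp only [hlen, Nat.lt_irrefl, if_false, Nat.sub_self, List.set_cons_zero]
        rw [pv_cell_succ, List.append_cons]
      rw [hset, List.set_set, List.set_set]
      simp only [Prod.mk.injEq, true_and]
      push_cast; ring

lemma pv_midFwd (x : Int) (hx : 0 ≤ x) (px : List (List (List Int))) (p : Int)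
    (hxl : x.toNat < px.length) (H : Nat)
    (n : Nat) (hn : n ≤ (px.getD x.toNat []).length)
    (hcells : ∀ y < n, ((px.getD x.toNat []).getD y []).length = H) :
    (PySem.List.pyRange 0 (n : Int) 1).foldl (pvStepY x) (px, p) =
      (px.set x.toNat ((List.range n).map (fun (y : Nat) => pvCell (p + (y : Int) * (H : Int)) H)
          ++ (px.getD x.toNat []).drop n),
       p + (n : Int) * (H : Int)) := by
  induction n with
  | zero =>
      rw [PySem.List.pyRange_one_eq_nil (by simp)]
      simp only [List.foldl_nil, List.range_zero, List.map_nil, List.nil_append, List.drop_zero,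
        Nat.cast_zero, zero_mul, add_zero]
      rw [pv_set_getD px x.toNat [] hxl]
  | succ n ih =>
      have hnlt : n < (px.getD x.toNat []).length := hn
      rw [show ((n + 1 : Nat) : Int) = (n : Int) + 1 by push_cast; ring,
        PySem.List.pyRange_one_succ_right (by exact_mod_cast Nat.zero_le n),
        List.foldl_append, ih (Nat.le_of_succ_le hn) (fun y hy => hcells y (Nat.lt_succ_of_lt hy))]
      simp only [List.foldl_cons, List.foldl_nil, pvStepY]
      have hxI : x < (px.length : Int) := by omega
      have hgx : PySem.List.pyGetD (px.set x.toNat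
            ((List.range n).map (fun (y : Nat) => pvCell (p + (y : Int) * (H : Int)) H)
              ++ (px.getD x.toNat []).drop n)) x []
          = (List.range n).map (fun (y : Nat) => pvCell (p + (y : Int) * (H : Int)) H)
              ++ (px.getD x.toNat []).drop n := by
        rw [PySem.List.pyGetD_eq_getElem _ _ hx (by simpa using hxI), List.getElem_set_self]
      have hgx' : (px.set x.toNat
            ((List.range n).map (fun (y : Nat) => pvCell (p + (y : Int) * (H : Int)) H)
              ++ (px.getD x.toNat []).drop n)).getD x.toNat []
          = (List.range n).map (fun (y : Nat) => pvCell (p + (y : Int) * (H : Int)) H)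
              ++ (px.getD x.toNat []).drop n := by
        rw [List.getD_eq_getElem _ _ (by simpa using hxl), List.getElem_set_self]
      have hgy : PySem.List.pyGetD ((List.range n).map (fun (y : Nat) => pvCell (p + (y : Int) * (H : Int)) H)
            ++ (px.getD x.toNat []).drop n) ((n : Nat) : Int) []
          = (px.getD x.toNat []).getD n [] := by
        rw [PySem.List.pyGetD_natCast, List.getD_append_right _ _ _ _ (by simp)]
        simp only [List.length_map, List.length_range, Nat.sub_self]
        rw [List.drop_eq_getElem_cons hnlt, List.getD_cons_zero,
          List.getD_eq_getElem _ _ hnlt]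
      rw [hgx, hgy, hcells n (Nat.lt_succ_self n)]
      have hylP : ((n : Int)).toNat < ((px.set x.toNat
            ((List.range n).map (fun (y : Nat) => pvCell (p + (y : Int) * (H : Int)) H)
              ++ (px.getD x.toNat []).drop n)).getD x.toNat []).length := by
        rw [hgx', Int.toNat_natCast]
        simp only [List.length_append, List.length_map, List.length_range, List.length_drop]
        omega
      have hnn : H ≤ (((px.set x.toNat
            ((List.range n).map (fun (y : Nat) => pvCell (p + (y : Int) * (H : Int)) H)
              ++ (px.getD x.toNat []).drop n)).getD x.toNat []).getD ((n : Int)).toNat []).length := by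
        rw [hgx', Int.toNat_natCast]
        rw [List.getD_append_right _ _ _ _ (by simp)]
        simp only [List.length_map, List.length_range, Nat.sub_self]
        rw [List.drop_eq_getElem_cons hnlt, List.getD_cons_zero,
          ← List.getD_eq_getElem _ _ hnlt, hcells n (Nat.lt_succ_self n)]
      rw [pv_inner x ((n : Nat) : Int) hx (by exact_mod_cast Nat.zero_le n) _ _
        (by simpa using hxl) hylP H hnn]
      rw [List.set_set]
      have hdropped : (((px.set x.toNat
            ((List.range n).map (fun (y : Nat) => pvCell (p + (y : Int) * (H : Int)) H)
              ++ (px.getD x.toNat []).drop n)).getD x.toNat []).getD ((n : Int)).toNat []).drop H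
          = [] := by
        rw [hgx', Int.toNat_natCast, List.getD_append_right _ _ _ _ (by simp)]
        simp only [List.length_map, List.length_range, Nat.sub_self]
        rw [List.drop_eq_getElem_cons hnlt, List.getD_cons_zero,
          ← List.getD_eq_getElem _ _ hnlt, ← hcells n (Nat.lt_succ_self n), List.drop_length]
      rw [hdropped, List.append_nil, hgx', Int.toNat_natCast, List.set_append]
      simp only [List.length_map, List.length_range, Nat.lt_irrefl, if_false, Nat.sub_self]
      rw [List.drop_eq_getElem_cons hnlt, List.set_cons_zero]
      simp only [Prod.mk.injEq]
      refine ⟨?_, by push_cast; ring⟩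
      rw [List.range_succ, List.map_append, List.map_singleton, List.append_cons]

lemma pv_midBwd (x : Int) (hx : 0 ≤ x) (H : Nat) :
    ∀ (k : Nat) (px : List (List (List Int))) (p : Int),
      x.toNat < px.length → k ≤ (px.getD x.toNat []).length →
      (∀ y < k, ((px.getD x.toNat []).getD y []).length = H) →
      (PySem.List.pyRange ((k : Int) - 1) (-1) (-1)).foldl (pvStepY x) (px, p) =
        (px.set x.toNat
          ((List.range k).map (fun (y : Nat) => pvCell (p + ((k : Int) - 1 - (y : Int)) * (H : Int)) H)
            ++ (px.getD x.toNat []).drop k),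
         p + (k : Int) * (H : Int)) := by
  intro k
  induction k with
  | zero =>
      intro px p hxl _ _
      rw [show ((0 : Nat) : Int) - 1 = -1 by simp, PySem.List.pyRange_neg_one_eq_nil (le_refl _)]
      simp only [List.foldl_nil, List.range_zero, List.map_nil, List.nil_append, List.drop_zero,
        Nat.cast_zero, zero_mul, add_zero]
      rw [pv_set_getD px x.toNat [] hxl]
  | succ k ih =>
      intro px p hxl hk hcells
      have hklt : k < (px.getD x.toNat []).length := hk
      have hxI : x < (px.length : Int) := by omega
      rw [show ((k + 1 : Nat) : Int) - 1 = (k : Int) by push_cast; ring,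
        PySem.List.pyRange_neg_one_cons (by omega)]
      simp only [List.foldl_cons, pvStepY]
      have hgx : PySem.List.pyGetD px x [] = px.getD x.toNat [] := by
        rw [PySem.List.pyGetD_eq_getElem _ _ hx (by simpa using hxI),
          List.getD_eq_getElem _ _ hxl]
      have hgy : PySem.List.pyGetD (px.getD x.toNat []) ((k : Nat) : Int) []
          = (px.getD x.toNat []).getD k [] := by
        rw [PySem.List.pyGetD_natCast]
      rw [hgx, hgy, hcells k (Nat.lt_succ_self k)]
      rw [pv_inner x ((k : Nat) : Int) hx (by exact_mod_cast Nat.zero_le k) px p hxl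
        (by simpa using hklt) H
        (by rw [Int.toNat_natCast, hcells k (Nat.lt_succ_self k)])]
      rw [Int.toNat_natCast]
      have hdropped : (((px.getD x.toNat []).getD k []).drop H) = [] := by
        rw [← hcells k (Nat.lt_succ_self k), List.drop_length]
      rw [hdropped, List.append_nil]
      have hgx' : ((px.set x.toNat ((px.getD x.toNat []).set k (pvCell p H))).getD x.toNat [])
          = (px.getD x.toNat []).set k (pvCell p H) := by
        rw [List.getD_eq_getElem _ _ (by simpa using hxl), List.getElem_set_self]
      rw [ih (px.set x.toNat ((px.getD x.toNat []).set k (pvCell p H))) (p + (H : Int))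
        (by simpa using hxl)
        (by rw [hgx']; simpa using Nat.le_of_lt hklt)
        (by intro y hy
            rw [hgx', pv_getD_set_ne _ _ _ _ _ (by omega)]
            exact hcells y (Nat.lt_succ_of_lt hy))]
      rw [List.set_set, hgx']
      have hdrop2 : ((px.getD x.toNat []).set k (pvCell p H)).drop k
          = pvCell p H :: (px.getD x.toNat []).drop (k + 1) := by
        rw [List.drop_set]
        simp only [Nat.lt_irrefl, if_false, Nat.sub_self]
        rw [List.drop_eq_getElem_cons hklt, List.set_cons_zero]
      rw [hdrop2]
      simp only [Prod.mk.injEq]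
      refine ⟨?_, by push_cast; ring⟩
      have hmaps : (List.range k).map
            (fun (y : Nat) => pvCell (p + (H : Int) + ((k : Int) - 1 - (y : Int)) * (H : Int)) H)
          = (List.range k).map
            (fun (y : Nat) => pvCell (p + ((k : Int) - (y : Int)) * (H : Int)) H) := by
        apply List.map_congr_left
        intro y _
        congr 1
        push_cast; ring
      have hlast : pvCell p H
          = pvCell (p + ((k : Int) - ((k : Nat) : Int)) * (H : Int)) H := by
        congr 1
        push_cast; ring
      rw [hmaps, hlast, List.range_succ, List.map_append, List.map_singleton, List.append_cons]

lemma pv_outer (L H : Nat) (px : List (List (List Int))) (p : Int) :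
    ∀ (n : Nat), n ≤ px.length →
      (∀ x < n, (px.getD x []).length = L ∧ ∀ y < L, ((px.getD x []).getD y []).length = H) →
      (PySem.List.pyRange 0 (n : Int) 1).foldl pvStepX (px, p) =
        ((List.range n).map (fun (x : Nat) =>
            pvRow (p + (x : Int) * ((L * H : Nat) : Int)) (x : Int) L H) ++ px.drop n,
         p + (n : Int) * ((L * H : Nat) : Int)) := by
  intro n
  induction n with
  | zero =>
      intro _ _
      rw [PySem.List.pyRange_one_eq_nil (by simp)]
      simp
  | succ n ih =>
      intro hn hrows
      have hpxn : n < px.length := hn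
      rw [show ((n + 1 : Nat) : Int) = (n : Int) + 1 by push_cast; ring,
        PySem.List.pyRange_one_succ_right (by exact_mod_cast Nat.zero_le n),
        List.foldl_append,
        ih (Nat.le_of_succ_le hn) (fun x hxn => hrows x (Nat.lt_succ_of_lt hxn))]
      simp only [List.foldl_cons, List.foldl_nil, pvStepX]
      have hgrow : PySem.List.pyGetD ((List.range n).map (fun (x : Nat) =>
            pvRow (p + (x : Int) * ((L * H : Nat) : Int)) (x : Int) L H) ++ px.drop n)
            ((n : Nat) : Int) []
          = px.getD n [] := by
        rw [PySem.List.pyGetD_natCast, List.getD_append_right _ _ _ _ (by simp)]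
        simp only [List.length_map, List.length_range, Nat.sub_self]
        rw [List.drop_eq_getElem_cons hpxn, List.getD_cons_zero, List.getD_eq_getElem _ _ hpxn]
      have hgrow' : (((List.range n).map (fun (x : Nat) =>
            pvRow (p + (x : Int) * ((L * H : Nat) : Int)) (x : Int) L H) ++ px.drop n).getD n [])
          = px.getD n [] := by
        rw [List.getD_append_right _ _ _ _ (by simp)]
        simp only [List.length_map, List.length_range, Nat.sub_self]
        rw [List.drop_eq_getElem_cons hpxn, List.getD_cons_zero, List.getD_eq_getElem _ _ hpxn]
      have hrowlen : (px.getD n []).length = L := (hrows n (Nat.lt_succ_self n)).1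
      rw [hgrow, hrowlen]
      have hPlen : ((n : Nat) : Int).toNat < ((List.range n).map (fun (x : Nat) =>
            pvRow (p + (x : Int) * ((L * H : Nat) : Int)) (x : Int) L H) ++ px.drop n).length := by
        rw [Int.toNat_natCast]
        simp only [List.length_append, List.length_map, List.length_range, List.length_drop]
        omega
      have hcellsP : ∀ y < L, ((((List.range n).map (fun (x : Nat) =>
            pvRow (p + (x : Int) * ((L * H : Nat) : Int)) (x : Int) L H)
              ++ px.drop n).getD ((n : Nat) : Int).toNat []).getD y []).length = H := by
        intro y hy
        rw [Int.toNat_natCast, hgrow']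
        exact (hrows n (Nat.lt_succ_self n)).2 y hy
      cases hpar : (PySem.Int.mod ((n : Nat) : Int) 2 == 0) with
      | true =>
          simp only [hpar, if_true]
          rw [pv_midFwd ((n : Nat) : Int) (by exact_mod_cast Nat.zero_le n) _ _ hPlen H L
            (by rw [Int.toNat_natCast, hgrow', hrowlen]) (by
              intro y hy
              have := hcellsP y hy
              rwa [Int.toNat_natCast] at this ⊢)]
          rw [Int.toNat_natCast, hgrow', ← hrowlen, List.drop_length, List.append_nil,
            List.set_append]
          simp only [List.length_map, List.length_range, Nat.lt_irrefl, if_false, Nat.sub_self]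
          rw [List.drop_eq_getElem_cons hpxn, List.set_cons_zero]
          simp only [Prod.mk.injEq]
          refine ⟨?_, by push_cast; ring⟩
          rw [List.range_succ, List.map_append, List.map_singleton, List.append_cons]
          congr 2
          simp only [pvRow, hpar, if_true]
      | false =>
          simp only [hpar, Bool.false_eq_true, if_false]
          rw [pv_midBwd ((n : Nat) : Int) (by exact_mod_cast Nat.zero_le n) H L _ _ hPlen
            (by rw [Int.toNat_natCast, hgrow', hrowlen]) (by
              intro y hy
              have := hcellsP y hy
              rwa [Int.toNat_natCast] at this ⊢)]
          rw [Int.toNat_natCast, hgrow', ← hrowlen, List.drop_length, List.append_nil,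
            List.set_append]
          simp only [List.length_map, List.length_range, Nat.lt_irrefl, if_false, Nat.sub_self]
          rw [List.drop_eq_getElem_cons hpxn, List.set_cons_zero]
          simp only [Prod.mk.injEq]
          refine ⟨?_, by push_cast; ring⟩
          rw [List.range_succ, List.map_append, List.map_singleton, List.append_cons]
          congr 2
          simp only [pvRow, hpar, Bool.false_eq_true, if_false, hrowlen]

lemma pv_led_eq_target (width length height : Int) :
    ledConfig width length height = pvTarget width length height := by
  unfold ledConfig
  simp only [List.map_const', PySem.List.length_pyRange_one, sub_zero, List.length_replicate]
  rw [pv_outer length.toNat height.toNat _ 0 width.toNat (by simp) (by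
    intro x hxw
    constructor
    · rw [List.getD_replicate _ hxw]; simp
    · intro y hy
      rw [List.getD_replicate _ hxw, List.getD_replicate _ hy]; simp)]
  simp only [List.drop_replicate, Nat.sub_self, List.replicate_zero, List.append_nil, zero_add]
  rfl

lemma pv_alt_eq_target (width length height : Int) :
    ledConfig_alt width length height = pvTarget width length height := by
  unfold ledConfig_alt pvTarget pvRow pvCell
  simp only [PySem.List.pyRange_one, sub_zero, List.map_map, Function.comp_def, zero_add]
  apply List.map_congr_left
  intro x _
  apply List.map_congr_left
  intro y hy
  have hy' : y < length.toNat := List.mem_range.mp hy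
  have hl : ((length.toNat : Int)) = length := by omega
  apply List.map_congr_left
  intro z hz
  have hz' : z < height.toNat := List.mem_range.mp hz
  have hh : ((height.toNat : Int)) = height := by omega
  rw [Nat.cast_mul, hl, hh]
  ring

-- ===== VERDICT (by name: the statement is the Claim_ definition above) =====
theorem ledConfig_spec : Claim_equal_ledConfig := by
  intro width length height _
  unfold Spec_ledConfig
  rw [pv_led_eq_target, pv_alt_eq_target]
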